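-- pv_equiv track=rewrite | github.com/fables-tales/scoring-2014 | lib/score_logic.py | tidy_slots
-- ===== SOURCE A (Python) =====
-- def tidy_slots(slot_map):
--     owners = {}
--     tidied = {}
--
--     for tla, slots in slot_map.items():
--         for s, val in slots.items():
--             if val:
--                 if s in owners:
--                     msg = "Slot {0} claims to be owned by at least '{1}' and '{2}'." \
--                             .format(s, tla, owners[s])
--                     raise Exception(msg)
--
--                 owners[s] = tla
--
--         tidied[tla] = set()
--
--     for slot, owner in owners.items():
--         tidied[owner].add(slot)
--
--     return tidied
-- ===== SOURCE B (Python) =====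
-- def tidy_slots(slot_map):
--     claims = [(s, tla) for tla, slots in slot_map.items()
--                        for s, val in slots.items() if val]
--
--     groups = {}
--     for s, tla in claims:
--         groups.setdefault(s, []).append(tla)
--
--     for s, tlas in groups.items():
--         if len(tlas) > 1:
--             msg = "Slot {0} claims to be owned by at least '{1}' and '{2}'." \
--                     .format(s, tlas[1], tlas[0])
--             raise Exception(msg)
--
--     return {tla: {s for s, val in slots.items() if val}
--             for tla, slots in slot_map.items()}
-- ===== Notes on version B (the rewrite author's own statement) =====
-- stated objective: alternative
-- what changed: B flattens all truthy (slot, owner) claims with a comprehension, groups them by slot and rejects any slot whose group has more than one owner, then builds the result as a direct dict comprehension over slot_map; A's incremental owners index and its second inversion loop over owners both disappear.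
import Mathlib
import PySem

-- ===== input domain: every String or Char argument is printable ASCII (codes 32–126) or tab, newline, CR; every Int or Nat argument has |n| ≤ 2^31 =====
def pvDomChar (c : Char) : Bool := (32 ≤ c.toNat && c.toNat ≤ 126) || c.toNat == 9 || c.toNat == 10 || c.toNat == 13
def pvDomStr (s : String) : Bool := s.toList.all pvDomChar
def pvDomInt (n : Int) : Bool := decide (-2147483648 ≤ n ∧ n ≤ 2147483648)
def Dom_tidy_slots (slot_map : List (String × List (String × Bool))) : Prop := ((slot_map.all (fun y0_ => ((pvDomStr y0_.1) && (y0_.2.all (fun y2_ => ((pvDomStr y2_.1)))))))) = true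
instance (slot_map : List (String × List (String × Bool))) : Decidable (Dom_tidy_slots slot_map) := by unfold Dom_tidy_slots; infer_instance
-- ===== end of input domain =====

-- B replaces A's incremental owners index and its second inversion loop by three staged passes:
-- flatten all truthy (slot, owner) claims, group them by slot and reject a slot with two owners,
-- then build the result directly from slot_map by a dict comprehension (no inversion).
-- Equal return values are proved on all conflict-free inputs (where A raises, B raises too).

-- ===== PORT A =====
-- A's inner 'for s, val in slots.items()' loop; 'none' is exactly A's 'raise Exception(msg)'.
def tidyClaimLoop (tla : String) (slots : List (String × Bool))
    (owners : PySem.Dict String String) : Option (PySem.Dict String String) :=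
  match slots with
  | [] => some owners
  | (s, val) :: rest =>
    if val then
      if owners.contains s then none   -- raise Exception(msg)
      else tidyClaimLoop tla rest (owners.insert s tla)
    else tidyClaimLoop tla rest owners

-- A's outer 'for tla, slots in slot_map.items()' loop.
def tidyOuterLoop (items : List (String × List (String × Bool)))
    (owners : PySem.Dict String String)
    (tidied : PySem.Dict String (PySem.Set String)) :
    Option (PySem.Dict String String × PySem.Dict String (PySem.Set String)) :=
  match items with
  | [] => some (owners, tidied)
  | (tla, slots) :: rest =>
    match tidyClaimLoop tla (PySem.Dict.ofList slots).items owners with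
    | none => none
    | some owners' => tidyOuterLoop rest owners' (tidied.insert tla PySem.Set.empty)

def tidy_slots (slot_map : List (String × List (String × Bool))) : List (String × List String) :=
  match tidyOuterLoop (PySem.Dict.ofList slot_map).items PySem.Dict.empty PySem.Dict.empty with
  | none => []   -- unreachable under Pre_tidy_slots: the Python raises here
  | some (owners, tidied) =>
    -- 'for slot, owner in owners.items(): tidied[owner].add(slot)'
    (owners.items.foldl
      (fun t p => t.modify p.2 PySem.Set.empty (fun st => PySem.Set.add st p.1)) tidied).items

-- ===== PORT B =====
-- 'claims = [(s, tla) for tla, slots in slot_map.items() for s, val in slots.items() if val]'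
def altClaims (items : List (String × List (String × Bool))) : List (String × String) :=
  items.flatMap (fun p =>
    ((PySem.Dict.ofList p.2).items.filter (fun q => q.2)).map (fun q => (q.1, p.1)))

-- 'groups = {}; for s, tla in claims: groups.setdefault(s, []).append(tla)'
def altGroups (claims : List (String × String)) : PySem.Dict String (List String) :=
  claims.foldl (fun g q => g.modify q.1 [] (fun l => l ++ [q.2])) PySem.Dict.empty

def tidy_slots_alt (slot_map : List (String × List (String × Bool))) : List (String × List String) :=
  let items := (PySem.Dict.ofList slot_map).items
  let groups := altGroups (altClaims items)
  -- 'for s, tlas in groups.items(): if len(tlas) > 1: raise Exception(msg)'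
  if groups.items.any (fun p => 1 < p.2.length) then []   -- unreachable under Pre_: B raises here
  else
    -- '{tla: {s for s, val in slots.items() if val} for tla, slots in slot_map.items()}'
    (items.foldl (fun d p =>
        d.insert p.1 (PySem.Set.ofList
          (((PySem.Dict.ofList p.2).items.filter (fun q => q.2)).map (fun q => q.1))))
      (PySem.Dict.empty : PySem.Dict String (List String))).items

-- ===== PRECONDITION & SPEC =====
-- The slot names an entry claims with a truthy value (after Python's dict() normalisation of the input pairs).
def tidyClaims (slots : List (String × Bool)) : List String :=
  ((PySem.Dict.ofList slots).items.filter (fun q => q.2)).map (fun q => q.1)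

-- Pre_ excludes exactly the inputs on which the Python A raises its conflict Exception:
-- some slot is claimed (with a truthy value) by two distinct entries of slot_map (B raises there too).
def Pre_tidy_slots (slot_map : List (String × List (String × Bool))) : Prop :=
  ((PySem.Dict.ofList slot_map).items.flatMap (fun p => tidyClaims p.2)).Nodup
instance (slot_map : List (String × List (String × Bool))) : Decidable (Pre_tidy_slots slot_map) := by
  unfold Pre_tidy_slots; infer_instance

def pvWitness_tidy_slots : (List (String × List (String × Bool))) :=
  [("ab", [("x", true), ("y", false)]), ("cd", [("z", true)])]

def Spec_tidy_slots (slot_map : List (String × List (String × Bool))) (out : List (String × List String)) : Prop :=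
  out = tidy_slots_alt slot_map
instance (slot_map : List (String × List (String × Bool))) (out : List (String × List String)) : Decidable (Spec_tidy_slots slot_map out) := by
  unfold Spec_tidy_slots; infer_instance

-- ===== CLAIM (what is proved, stated in full; the proofs are below) =====
def Claim_equal_tidy_slots : Prop := ∀ (slot_map : List (String × List (String × Bool))), Dom_tidy_slots slot_map → Pre_tidy_slots slot_map → Spec_tidy_slots slot_map (tidy_slots slot_map)

-- ===== LEMMAS AND PROOFS =====
-- Abbreviations for the proof.
def clRaw (slots : List (String × Bool)) : List String :=
  (slots.filter (fun q => q.2)).map (fun q => q.1)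

def flatAll (L : List (String × List (String × Bool))) : List String :=
  L.flatMap (fun p => tidyClaims p.2)

def pairsOf (L : List (String × List (String × Bool))) : List (String × String) :=
  L.flatMap (fun p => (tidyClaims p.2).map (fun s => (s, p.1)))

def specOf (L : List (String × List (String × Bool))) : List (String × List String) :=
  L.map (fun p => (p.1, tidyClaims p.2))

lemma tidyClaims_eq (slots : List (String × Bool)) :
    tidyClaims slots = clRaw (PySem.Dict.ofList slots).items := rfl

lemma contains_true_iff {ν : Type} (d : PySem.Dict String ν) (s : String) :
    d.contains s = true ↔ s ∈ d.items.map Prod.fst := by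
  rw [PySem.Dict.contains_eq_isSome_get?]
  simp only [PySem.Dict.get?, Option.isSome_map]
  rw [List.find?_isSome]
  constructor
  · rintro ⟨x, hx, hpx⟩
    have hx1 : x.1 = s := beq_iff_eq.mp hpx
    exact hx1 ▸ List.mem_map_of_mem hx
  · intro hm
    obtain ⟨x, hx, hxs⟩ := List.mem_map.mp hm
    exact ⟨x, hx, beq_iff_eq.mpr hxs⟩

lemma contains_false_of_not_mem {ν : Type} (d : PySem.Dict String ν) (s : String)
    (h : s ∉ d.items.map Prod.fst) : d.contains s = false := by
  rw [Bool.eq_false_iff]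
  exact fun hc => h ((contains_true_iff d s).mp hc)

lemma tidyClaimLoop_eq (tla : String) :
    ∀ (slots : List (String × Bool)) (owners : PySem.Dict String String),
      (clRaw slots).Nodup →
      (∀ s ∈ clRaw slots, owners.contains s = false) →
      ∃ ow, tidyClaimLoop tla slots owners = some ow ∧
        ow.items = owners.items ++ (clRaw slots).map (fun s => (s, tla)) := by
  intro slots
  induction slots with
  | nil => intro owners _ _; exact ⟨owners, rfl, by simp [clRaw]⟩
  | cons p rest ih =>
    obtain ⟨s, val⟩ := p
    intro owners hnd hfresh
    by_cases hv : val = true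
    · subst hv
      have hcl : clRaw ((s, true) :: rest) = s :: clRaw rest := by simp [clRaw]
      rw [hcl] at hnd hfresh
      have hc : owners.contains s = false := hfresh s (List.mem_cons_self ..)
      have hstep : tidyClaimLoop tla ((s, true) :: rest) owners =
          tidyClaimLoop tla rest (owners.insert s tla) := by
        simp [tidyClaimLoop, hc]
      have hfresh' : ∀ s' ∈ clRaw rest, (owners.insert s tla).contains s' = false := by
        intro s' hs'
        rw [PySem.Dict.contains_insert]
        have hne : s' ≠ s := by
          rintro rfl; exact (List.nodup_cons.mp hnd).1 hs'
        simp [hne, hfresh s' (List.mem_cons_of_mem _ hs')]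
      obtain ⟨ow, he, hit⟩ := ih (owners.insert s tla) (List.nodup_cons.mp hnd).2 hfresh'
      refine ⟨ow, by rw [hstep, he], ?_⟩
      rw [hit, hcl]
      simp [PySem.Dict.insert, hc]
    · have hv' : val = false := by simpa using hv
      subst hv'
      have hcl : clRaw ((s, false) :: rest) = clRaw rest := by simp [clRaw]
      rw [hcl] at hnd hfresh
      obtain ⟨ow, he, hit⟩ := ih owners hnd hfresh
      exact ⟨ow, by simpa [tidyClaimLoop] using he, by rw [hit, hcl]⟩

lemma tidyOuterLoop_eq :
    ∀ (L : List (String × List (String × Bool))) (owners : PySem.Dict String String)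
      (base : List (String × PySem.Set String)),
      ((base.map Prod.fst) ++ L.map Prod.fst).Nodup →
      (flatAll L).Nodup →
      (∀ s ∈ flatAll L, owners.contains s = false) →
      ∃ ow, tidyOuterLoop L owners (PySem.Dict.mk base) =
          some (ow, PySem.Dict.mk
            (base ++ L.map (fun p => (p.1, (PySem.Set.empty : PySem.Set String))))) ∧
        ow.items = owners.items ++ pairsOf L := by
  intro L
  induction L with
  | nil => intro owners base _ _ _; exact ⟨owners, by simp [tidyOuterLoop], by simp [pairsOf]⟩
  | cons p rest ih =>
    obtain ⟨tla, slots⟩ := p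
    intro owners base hnd hfa hfresh
    have hfa' : flatAll ((tla, slots) :: rest) = tidyClaims slots ++ flatAll rest := by
      simp [flatAll]
    rw [hfa'] at hfa hfresh
    rw [List.nodup_append] at hfa
    obtain ⟨hnd₁, hnd₂, hdisj⟩ := hfa
    have hkey : tla ∉ base.map Prod.fst ∧ tla ∉ (rest.map Prod.fst) := by
      constructor
      · intro h
        rw [List.nodup_append] at hnd
        exact hnd.2.2 tla h tla (by simp) rfl
      · intro h
        rw [List.nodup_append] at hnd
        have := hnd.2.1
        simp only [List.map_cons, List.nodup_cons] at this
        exact this.1 h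
    obtain ⟨ow₁, he₁, hit₁⟩ := tidyClaimLoop_eq tla (PySem.Dict.ofList slots).items owners
      (by rw [← tidyClaims_eq]; exact hnd₁)
      (by rw [← tidyClaims_eq]; intro s hs; exact hfresh s (List.mem_append_left _ hs))
    have hfresh' : ∀ s ∈ flatAll rest, ow₁.contains s = false := by
      intro s hs
      apply contains_false_of_not_mem
      rw [hit₁, ← tidyClaims_eq]
      simp only [List.map_append, List.map_map, List.mem_append]
      rintro (hmem | hmem)
      · have hct := (contains_true_iff owners s).mpr hmem
        have hcf := hfresh s (List.mem_append_right _ hs)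
        rw [hcf] at hct
        exact absurd hct (by simp)
      · have hm : s ∈ tidyClaims slots := by simpa using hmem
        exact hdisj s hm s hs rfl
    have hcb : (PySem.Dict.mk base).contains tla = false :=
      contains_false_of_not_mem _ _ (by simpa using hkey.1)
    have hins : (PySem.Dict.mk base).insert tla PySem.Set.empty =
        PySem.Dict.mk (base ++ [(tla, PySem.Set.empty)]) := by
      simp [PySem.Dict.insert, hcb]
    have hnd' : (((base ++ [(tla, (PySem.Set.empty : PySem.Set String))]).map Prod.fst)
        ++ rest.map Prod.fst).Nodup := by
      have heq : ((base ++ [(tla, (PySem.Set.empty : PySem.Set String))]).map Prod.fst)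
          ++ rest.map Prod.fst = base.map Prod.fst ++ (tla :: rest.map Prod.fst) := by simp
      rw [heq]
      simpa using hnd
    obtain ⟨ow, he, hit⟩ := ih ow₁ (base ++ [(tla, PySem.Set.empty)]) hnd' hnd₂ hfresh'
    refine ⟨ow, ?_, ?_⟩
    · show (match tidyClaimLoop tla (PySem.Dict.ofList slots).items owners with
        | none => none
        | some owners' => tidyOuterLoop rest owners'
            ((PySem.Dict.mk base).insert tla PySem.Set.empty)) = _
      rw [he₁, hins]
      simp only []
      rw [he]
      simp
    · rw [hit, hit₁]
      have hp : pairsOf ((tla, slots) :: rest) =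
          (tidyClaims slots).map (fun s => (s, tla)) ++ pairsOf rest := by simp [pairsOf]
      rw [hp, ← tidyClaims_eq, List.append_assoc]

lemma find?_mk_middle {ν : Type} (pre post : List (String × ν)) (tla : String) (v : ν)
    (hpre : tla ∉ pre.map Prod.fst) :
    List.find? (fun p => p.1 == tla) (pre ++ (tla, v) :: post) = some (tla, v) := by
  induction pre with
  | nil => simp
  | cons q qre ih =>
    simp only [List.map_cons, List.mem_cons, not_or] at hpre
    have hq : (q.1 == tla) = false := by
      rw [beq_eq_false_iff_ne]; exact fun h => hpre.1 h.symm
    rw [List.cons_append, List.find?_cons_of_neg (by simp [hq])]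
    exact ih hpre.2

lemma modify_mk_middle (pre post : List (String × PySem.Set String)) (tla : String)
    (v : PySem.Set String) (f : PySem.Set String → PySem.Set String)
    (hpre : tla ∉ pre.map Prod.fst) (hpost : tla ∉ post.map Prod.fst) :
    (PySem.Dict.mk (pre ++ (tla, v) :: post)).modify tla PySem.Set.empty f =
      PySem.Dict.mk (pre ++ (tla, f v) :: post) := by
  have hg : (PySem.Dict.mk (pre ++ (tla, v) :: post)).getD tla PySem.Set.empty = v := by
    simp [PySem.Dict.getD, PySem.Dict.get?, find?_mk_middle pre post tla v hpre]
  have hc : (PySem.Dict.mk (pre ++ (tla, v) :: post)).contains tla = true := by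
    apply (contains_true_iff _ _).mpr
    simp
  have h1 : pre.map (fun p => if p.1 == tla then (tla, f v) else p) = pre := by
    conv_rhs => rw [← List.map_id pre]
    apply List.map_congr_left
    intro p hp
    have hne : (p.1 == tla) = false := by
      rw [beq_eq_false_iff_ne]
      rintro rfl
      exact hpre (List.mem_map_of_mem hp)
    simp [hne]
  have h2 : post.map (fun p => if p.1 == tla then (tla, f v) else p) = post := by
    conv_rhs => rw [← List.map_id post]
    apply List.map_congr_left
    intro p hp
    have hne : (p.1 == tla) = false := by
      rw [beq_eq_false_iff_ne]
      rintro rfl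
      exact hpost (List.mem_map_of_mem hp)
    simp [hne]
  simp only [PySem.Dict.modify, hg, PySem.Dict.insert, hc, if_pos]
  apply PySem.Dict.ext
  show (pre ++ (tla, v) :: post).map (fun p => if p.1 == tla then (tla, f v) else p) =
    pre ++ (tla, f v) :: post
  rw [List.map_append, List.map_cons, h1, h2]
  simp

lemma distBlock (tla : String) :
    ∀ (cs : List String) (pre post : List (String × PySem.Set String)) (v : PySem.Set String),
      tla ∉ pre.map Prod.fst → tla ∉ post.map Prod.fst →
      ((cs.map (fun s => (s, tla))).foldl
          (fun t p => t.modify p.2 PySem.Set.empty (fun st => PySem.Set.add st p.1))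
          (PySem.Dict.mk (pre ++ (tla, v) :: post)))
        = PySem.Dict.mk (pre ++ (tla, PySem.Set.update v cs) :: post) := by
  intro cs
  induction cs with
  | nil => intro pre post v _ _; simp [PySem.Set.update]
  | cons c cs ih =>
    intro pre post v hpre hpost
    simp only [List.map_cons, List.foldl_cons]
    rw [modify_mk_middle pre post tla v _ hpre hpost, ih pre post _ hpre hpost,
      PySem.Set.update_cons]

lemma distAll :
    ∀ (L : List (String × List (String × Bool))) (base : List (String × PySem.Set String)),
      ((base.map Prod.fst) ++ L.map Prod.fst).Nodup →
      (flatAll L).Nodup →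
      (pairsOf L).foldl
          (fun t p => t.modify p.2 PySem.Set.empty (fun st => PySem.Set.add st p.1))
          (PySem.Dict.mk (base ++ L.map (fun p => (p.1, (PySem.Set.empty : PySem.Set String)))))
        = PySem.Dict.mk (base ++ specOf L) := by
  intro L
  induction L with
  | nil => intro base _ _; simp [pairsOf, specOf]
  | cons p rest ih =>
    obtain ⟨tla, slots⟩ := p
    intro base hnd hfa
    have hpairs : pairsOf ((tla, slots) :: rest) =
        (tidyClaims slots).map (fun s => (s, tla)) ++ pairsOf rest := by simp [pairsOf]
    have hfa' : flatAll ((tla, slots) :: rest) = tidyClaims slots ++ flatAll rest := by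
      simp [flatAll]
    rw [hfa'] at hfa
    rw [List.nodup_append] at hfa
    obtain ⟨hnd₁, hnd₂, _⟩ := hfa
    have hkey : tla ∉ base.map Prod.fst ∧ tla ∉ (rest.map Prod.fst) := by
      constructor
      · intro h
        rw [List.nodup_append] at hnd
        exact hnd.2.2 tla h tla (by simp) rfl
      · intro h
        rw [List.nodup_append] at hnd
        have := hnd.2.1
        simp only [List.map_cons, List.nodup_cons] at this
        exact this.1 h
    rw [hpairs, List.foldl_append]
    have hmap : ((tla, slots) :: rest).map
        (fun p => (p.1, (PySem.Set.empty : PySem.Set String))) =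
        (tla, (PySem.Set.empty : PySem.Set String)) ::
          rest.map (fun p => (p.1, (PySem.Set.empty : PySem.Set String))) := by simp
    rw [hmap]
    rw [distBlock tla (tidyClaims slots) base
      (rest.map (fun p => (p.1, (PySem.Set.empty : PySem.Set String)))) PySem.Set.empty
      hkey.1 (by simpa using hkey.2)]
    have hupd : PySem.Set.update PySem.Set.empty (tidyClaims slots) = tidyClaims slots := by
      rw [show (PySem.Set.empty : PySem.Set String).update (tidyClaims slots)
          = PySem.Set.ofList (tidyClaims slots) from rfl]
      exact PySem.Set.ofList_eq_self_of_nodup _ hnd₁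
    rw [hupd]
    have hre : base ++ (tla, (tidyClaims slots : PySem.Set String)) ::
        rest.map (fun p => (p.1, (PySem.Set.empty : PySem.Set String))) =
        (base ++ [(tla, (tidyClaims slots : PySem.Set String))]) ++
          rest.map (fun p => (p.1, (PySem.Set.empty : PySem.Set String))) := by simp
    rw [hre]
    have hnd' : (((base ++ [(tla, (tidyClaims slots : PySem.Set String))]).map Prod.fst)
        ++ rest.map Prod.fst).Nodup := by
      have heq : ((base ++ [(tla, (tidyClaims slots : PySem.Set String))]).map Prod.fst)
          ++ rest.map Prod.fst = base.map Prod.fst ++ (tla :: rest.map Prod.fst) := by simp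
      rw [heq]
      simpa using hnd
    rw [ih (base ++ [(tla, tidyClaims slots)]) hnd' hnd₂]
    simp [specOf]

lemma tidy_slots_eq_specOf (slot_map : List (String × List (String × Bool)))
    (h : Pre_tidy_slots slot_map) :
    tidy_slots slot_map = specOf (PySem.Dict.ofList slot_map).items := by
  have hPre : (flatAll (PySem.Dict.ofList slot_map).items).Nodup := h
  have hkeys : ((PySem.Dict.ofList slot_map).items.map Prod.fst).Nodup := by
    have h2 : ((PySem.Dict.ofList slot_map).keys).Nodup := PySem.Dict.nodup_keys_ofList _
    simpa [PySem.Dict.keys] using h2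
  obtain ⟨ow, he, hit⟩ := tidyOuterLoop_eq (PySem.Dict.ofList slot_map).items
    PySem.Dict.empty [] (by simpa using hkeys) hPre (by intro s _; simp)
  have he' : tidyOuterLoop (PySem.Dict.ofList slot_map).items
      PySem.Dict.empty PySem.Dict.empty =
      some (ow, PySem.Dict.mk ([] ++ (PySem.Dict.ofList slot_map).items.map
        (fun p => (p.1, (PySem.Set.empty : PySem.Set String))))) := he
  show (match tidyOuterLoop (PySem.Dict.ofList slot_map).items
      PySem.Dict.empty PySem.Dict.empty with
    | none => []
    | some (owners, tidied) =>
      (owners.items.foldl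
        (fun t p => t.modify p.2 PySem.Set.empty (fun st => PySem.Set.add st p.1)) tidied).items)
    = specOf (PySem.Dict.ofList slot_map).items
  rw [he']
  show (ow.items.foldl
      (fun t p => t.modify p.2 PySem.Set.empty (fun st => PySem.Set.add st p.1))
      (PySem.Dict.mk ([] ++ (PySem.Dict.ofList slot_map).items.map
        (fun p => (p.1, (PySem.Set.empty : PySem.Set String)))))).items
    = specOf (PySem.Dict.ofList slot_map).items
  rw [hit]
  have hni : PySem.Dict.empty.items ++ pairsOf (PySem.Dict.ofList slot_map).items
      = pairsOf (PySem.Dict.ofList slot_map).items := by simp [PySem.Dict.empty]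
  rw [hni, distAll (PySem.Dict.ofList slot_map).items [] (by simpa using hkeys) hPre]
  simp

-- ===== B-side lemmas =====
lemma altClaims_eq_pairsOf (L : List (String × List (String × Bool))) :
    altClaims L = pairsOf L := by
  simp [altClaims, pairsOf, tidyClaims, List.map_map, Function.comp_def]

lemma map_fst_pairsOf (L : List (String × List (String × Bool))) :
    (pairsOf L).map Prod.fst = flatAll L := by
  simp [pairsOf, flatAll, List.map_flatMap, List.map_map, Function.comp_def]

lemma altGroups_items :
    ∀ (ps : List (String × String)) (g : PySem.Dict String (List String)),
      (ps.map Prod.fst).Nodup →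
      (∀ s ∈ ps.map Prod.fst, g.contains s = false) →
      (ps.foldl (fun g q => g.modify q.1 [] (fun l => l ++ [q.2])) g).items =
        g.items ++ ps.map (fun q => (q.1, [q.2])) := by
  intro ps
  induction ps with
  | nil => intro g _ _; simp
  | cons q rest ih =>
    obtain ⟨s, t⟩ := q
    intro g hnd hfresh
    simp only [List.map_cons, List.nodup_cons] at hnd
    have hc : g.contains s = false := hfresh s (by simp)
    have hstep : g.modify s [] (fun l => l ++ [t]) = g.insert s [t] := by
      simp [PySem.Dict.modify, hc, PySem.Dict.getD_of_not_contains]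
    have hfresh' : ∀ s' ∈ rest.map Prod.fst, (g.insert s [t]).contains s' = false := by
      intro s' hs'
      rw [PySem.Dict.contains_insert]
      have hne : s' ≠ s := fun h => hnd.1 (h ▸ hs')
      simp [hne, hfresh s' (by simp [hs'])]
    simp only [List.foldl_cons]
    rw [hstep, ih (g.insert s [t]) hnd.2 hfresh']
    rw [PySem.Dict.items_insert_of_not_contains _ _ hc]
    simp

lemma sublist_claims (L : List (String × List (String × Bool)))
    (hnd : (flatAll L).Nodup) (p : String × List (String × Bool)) (hp : p ∈ L) :
    (tidyClaims p.2).Nodup := by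
  have hs : (tidyClaims p.2).Sublist (flatAll L) := by
    unfold flatAll
    rw [List.flatMap_def]
    exact List.sublist_flatten_of_mem (List.mem_map_of_mem hp)
  exact hnd.sublist hs

lemma tidy_slots_alt_eq_specOf (slot_map : List (String × List (String × Bool)))
    (h : Pre_tidy_slots slot_map) :
    tidy_slots_alt slot_map = specOf (PySem.Dict.ofList slot_map).items := by
  have hPre : (flatAll (PySem.Dict.ofList slot_map).items).Nodup := h
  have hkeys : ((PySem.Dict.ofList slot_map).items.map Prod.fst).Nodup := by
    have h2 : ((PySem.Dict.ofList slot_map).keys).Nodup := PySem.Dict.nodup_keys_ofList _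
    simpa [PySem.Dict.keys] using h2
  have hcl : altClaims (PySem.Dict.ofList slot_map).items
      = pairsOf (PySem.Dict.ofList slot_map).items := altClaims_eq_pairsOf _
  have hfst : (pairsOf (PySem.Dict.ofList slot_map).items).map Prod.fst
      = flatAll (PySem.Dict.ofList slot_map).items := map_fst_pairsOf _
  have hgit : (altGroups (altClaims (PySem.Dict.ofList slot_map).items)).items =
      (pairsOf (PySem.Dict.ofList slot_map).items).map (fun q => (q.1, [q.2])) := by
    unfold altGroups
    rw [hcl, altGroups_items _ PySem.Dict.empty (by rw [hfst]; exact hPre)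
      (by intro s _; simp)]
    simp [PySem.Dict.empty]
  have hany : ((altGroups (altClaims (PySem.Dict.ofList slot_map).items)).items.any
      (fun p => 1 < p.2.length)) = false := by
    rw [hgit]
    simp
  show (if ((altGroups (altClaims (PySem.Dict.ofList slot_map).items)).items.any
      (fun p => 1 < p.2.length)) then ([] : List (String × List String))
    else ((PySem.Dict.ofList slot_map).items.foldl (fun d p =>
        d.insert p.1 (PySem.Set.ofList
          (((PySem.Dict.ofList p.2).items.filter (fun q => q.2)).map (fun q => q.1))))
      (PySem.Dict.empty : PySem.Dict String (List String))).items)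
    = specOf (PySem.Dict.ofList slot_map).items
  rw [hany]
  simp only [Bool.false_eq_true, if_false]
  have hffi := PySem.Dict.items_foldl_insert_fresh
    (l := (PySem.Dict.ofList slot_map).items) (k := Prod.fst)
    (v := fun p => (PySem.Set.ofList
      (((PySem.Dict.ofList p.2).items.filter (fun q => q.2)).map (fun q => q.1)) : List String))
    (d := PySem.Dict.empty) (by intro a _; simp) hkeys
  rw [hffi]
  simp only [PySem.Dict.empty, List.nil_append]
  show ((PySem.Dict.ofList slot_map).items.map
      (fun p => (p.1, PySem.Set.ofList (tidyClaims p.2))))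
    = specOf (PySem.Dict.ofList slot_map).items
  unfold specOf
  apply List.map_congr_left
  intro p hp
  rw [PySem.Set.ofList_eq_self_of_nodup _ (sublist_claims _ hPre p hp)]

-- ===== VERDICT (by name: the statement is the Claim_ definition above) =====
theorem tidy_slots_spec : Claim_equal_tidy_slots := by
  intro slot_map _ hpre
  show tidy_slots slot_map = tidy_slots_alt slot_map
  rw [tidy_slots_eq_specOf slot_map hpre, tidy_slots_alt_eq_specOf slot_map hpre]
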